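-- pv_equiv track=rewrite | github.com/EngComp-Projetos/Computacao_Evolutiva | ag.py | mais_apto
-- ===== SOURCE A (Python) =====
-- def mais_apto(aptidoes, populacao):
--     # Esta função retorna a maior aptidão e o cromossomo do indivíduo com a maior aptidão
--     apto = aptidoes[0]
--     cromossomo = populacao[0]
--     for i in range(1, len(aptidoes)):
--         if apto < aptidoes[i]:
--             apto = aptidoes[i]
--             cromossomo = populacao[i]
--
--     return apto, cromossomo
-- ===== SOURCE B (Python) =====
-- def mais_apto(aptidoes, populacao):
--     # Idiomatic two-pass version: library max, then first-occurrence lookup.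
--     # Both max() and list.index() pick the first maximal element, matching
--     # A's tie-breaking; out-of-range / empty inputs raise like A does
--     # (except empty aptidoes, where max raises ValueError; outside Pre_).
--     m = max(aptidoes)
--     return m, populacao[aptidoes.index(m)]
-- ===== Notes on version B (the rewrite author's own statement) =====
-- stated objective: idiomatic
-- what changed: Replaced A's fused manual scan (tracking best value and chromosome together in one loop) with two library passes: max(aptidoes) followed by aptidoes.index(m) to locate the first maximum.
import Mathlib
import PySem

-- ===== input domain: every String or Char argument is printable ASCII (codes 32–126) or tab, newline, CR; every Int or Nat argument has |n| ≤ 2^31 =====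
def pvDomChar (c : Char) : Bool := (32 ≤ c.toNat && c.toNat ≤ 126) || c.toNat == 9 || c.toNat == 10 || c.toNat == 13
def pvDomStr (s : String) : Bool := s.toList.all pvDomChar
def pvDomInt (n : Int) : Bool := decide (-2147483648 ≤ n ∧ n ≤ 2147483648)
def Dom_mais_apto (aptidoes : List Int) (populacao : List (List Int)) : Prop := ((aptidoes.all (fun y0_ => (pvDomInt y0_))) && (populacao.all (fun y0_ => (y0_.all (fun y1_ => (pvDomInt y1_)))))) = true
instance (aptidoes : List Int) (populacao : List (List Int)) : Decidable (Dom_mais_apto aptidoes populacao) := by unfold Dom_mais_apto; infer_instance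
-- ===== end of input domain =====

-- B replaces A's fused best-so-far scan with two library passes (max, then first index of the max); same values, ties and raising inputs.

-- ===== PORT A =====
def mais_apto (aptidoes : List Int) (populacao : List (List Int)) : Int × List Int :=
  let apto := PySem.List.pyGetD aptidoes 0 0
  let cromossomo := PySem.List.pyGetD populacao 0 []
  (PySem.List.pyRange 1 (aptidoes.length : Int) 1).foldl
    (fun st i =>
      if st.1 < PySem.List.pyGetD aptidoes i 0 then
        (PySem.List.pyGetD aptidoes i 0, PySem.List.pyGetD populacao i [])
      else st)
    (apto, cromossomo)

-- ===== PORT B =====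
def mais_apto_alt (aptidoes : List Int) (populacao : List (List Int)) : Int × List Int :=
  let m := (PySem.List.max? aptidoes id).getD 0
  let i := (PySem.List.index? aptidoes m).getD 0
  (m, PySem.List.pyGetD populacao (i : Int) [])

-- ===== PRECONDITION & SPEC =====
-- Pre_ = exactly the inputs on which Python A returns: aptidoes nonempty and the
-- first occurrence of its maximum a valid index into populacao (else IndexError).
def Pre_mais_apto (aptidoes : List Int) (populacao : List (List Int)) : Prop :=
  aptidoes ≠ [] ∧ aptidoes.idxOf (aptidoes.foldl max (aptidoes.headD 0)) < populacao.length
instance (aptidoes : List Int) (populacao : List (List Int)) : Decidable (Pre_mais_apto aptidoes populacao) := by unfold Pre_mais_apto; infer_instance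
def pvWitness_mais_apto : List Int × List (List Int) := ([3, 7, 5], [[1], [2], [3]])

def Spec_mais_apto (aptidoes : List Int) (populacao : List (List Int)) (out : Int × List Int) : Prop := out = mais_apto_alt aptidoes populacao
instance (aptidoes : List Int) (populacao : List (List Int)) (out : Int × List Int) : Decidable (Spec_mais_apto aptidoes populacao out) := by unfold Spec_mais_apto; infer_instance

-- ===== CLAIM (what is proved, stated in full; the proofs are below) =====
def Claim_equal_mais_apto : Prop := ∀ (aptidoes : List Int) (populacao : List (List Int)), Dom_mais_apto aptidoes populacao → Pre_mais_apto aptidoes populacao → Spec_mais_apto aptidoes populacao (mais_apto aptidoes populacao)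

-- ===== LEMMAS AND PROOFS =====

-- pyGetD on the left part of an append
lemma pyGetD_append_left {α : Type} (l t : List α) (i : Int) (d : α)
    (h0 : 0 ≤ i) (h : i < (l.length : Int)) :
    PySem.List.pyGetD (l ++ t) i d = PySem.List.pyGetD l i d := by
  have hi : i.toNat < l.length := by omega
  simp [PySem.List.pyGetD, PySem.List.pyGet?_of_nonneg _ h0,
    List.getElem?_append_left hi]

-- max? over a snoc, when the prefix is nonempty
lemma max?_snoc (l : List Int) (x m : Int) (hM : PySem.List.max? l id = some m) :
    PySem.List.max? (l ++ [x]) id = if m < x then some x else some m := by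
  unfold PySem.List.max? at hM ⊢
  rw [List.foldl_append, hM]
  simp

-- max? of a nonempty list is some
lemma max?_ne_none : ∀ (l : List Int), l ≠ [] → ∃ m, PySem.List.max? l id = some m := by
  intro l hl
  obtain ⟨a, t, rfl⟩ := List.exists_cons_of_ne_nil hl
  unfold PySem.List.max?
  rw [List.foldl_cons]
  clear hl
  induction t generalizing a with
  | nil => exact ⟨a, rfl⟩
  | cons b t ih =>
    rw [List.foldl_cons]
    by_cases h : (a : Int) < b
    · simpa [h] using ih b
    · simpa [h] using ih a

-- A's loop computes (first maximum, chromosome at its first index), totalized with defaults.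
lemma mais_apto_char (populacao : List (List Int)) :
    ∀ (aptidoes : List Int), aptidoes ≠ [] →
      mais_apto aptidoes populacao =
        ((PySem.List.max? aptidoes id).getD 0,
         PySem.List.pyGetD populacao
           (((PySem.List.index? aptidoes ((PySem.List.max? aptidoes id).getD 0)).getD 0 : Nat) : Int) []) := by
  intro aptidoes
  induction aptidoes using List.reverseRecOn with
  | nil => intro h; exact absurd rfl h
  | append_singleton l x ih =>
    intro _
    by_cases hl : l = []
    · subst hl
      simp [mais_apto, PySem.List.pyRange_one_eq_nil (by norm_num : (1:Int) ≤ 1),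
        PySem.List.max?, PySem.List.index?, PySem.List.pyGetD]
    · -- split the range at l.length
      have hlen : (0:Int) < (l.length : Int) := by
        have := List.length_pos_iff.mpr hl; exact_mod_cast this
      have hrange : PySem.List.pyRange 1 ((l ++ [x]).length : Int) 1
          = PySem.List.pyRange 1 (l.length : Int) 1 ++ [(l.length : Int)] := by
        have : ((l ++ [x]).length : Int) = (l.length : Int) + 1 := by
          simp
        rw [this, PySem.List.pyRange_one_succ_right (by omega)]
      rw [mais_apto, hrange, List.foldl_append]
      -- the prefix loop over l ++ [x] equals A's loop over l
      have hcongr :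
          (PySem.List.pyRange 1 (l.length : Int) 1).foldl
            (fun st i =>
              if st.1 < PySem.List.pyGetD (l ++ [x]) i 0 then
                (PySem.List.pyGetD (l ++ [x]) i 0, PySem.List.pyGetD populacao i [])
              else st)
            (PySem.List.pyGetD (l ++ [x]) 0 0, PySem.List.pyGetD populacao 0 [])
          = mais_apto l populacao := by
        rw [mais_apto]
        have h0 : PySem.List.pyGetD (l ++ [x]) 0 0 = PySem.List.pyGetD l 0 0 :=
          pyGetD_append_left l [x] 0 0 le_rfl hlen
        rw [h0]
        apply PySem.List.foldl_congr_mem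
        intro acc i hi
        rw [PySem.List.mem_pyRange_one] at hi
        rw [pyGetD_append_left l [x] i 0 (by omega) hi.2]
      rw [hcongr, ih hl]
      -- the final step, at index l.length, sees the appended element x
      have hx : PySem.List.pyGetD (l ++ [x]) (l.length : Int) 0 = x := by
        simp [PySem.List.pyGetD]
      obtain ⟨m, hM⟩ := max?_ne_none l hl
      rw [max?_snoc l x m hM]
      simp only [List.foldl_cons, List.foldl_nil, hx, hM, Option.getD_some]
      by_cases hlt : m < x
      · have hnotmem : x ∉ l := fun hmem =>
          absurd (PySem.List.max?_isMax hM x hmem) (by simpa using hlt)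
        rw [if_pos hlt, if_pos hlt]
        simp only [Option.getD_some]
        rw [PySem.List.index?_append_singleton_self l x hnotmem]
        simp
      · rw [if_neg hlt, if_neg hlt]
        simp only [Option.getD_some]
        rw [PySem.List.index?_append_of_mem [x] (PySem.List.max?_mem hM)]

-- ===== VERDICT (by name: the statement is the Claim_ definition above) =====
theorem mais_apto_spec : Claim_equal_mais_apto := by
  intro aptidoes populacao _ hpre
  unfold Spec_mais_apto mais_apto_alt
  exact mais_apto_char populacao aptidoes hpre.1
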